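-- pv_equiv track=rewrite | github.com/fleshmetal/traverse | src/traverse/processing/normalize.py | split_genres_styles
-- ===== SOURCE A (Python) =====
-- from typing import Dict, Iterable, List, Sequence, Tuple
--
-- DELIMS_DEFAULT: Tuple[str, ...] = ("|", ",", ";")
--
-- def safe_str(x: object | None) -> str:
--     if x is None:
--         return ""
--     return str(x).strip()
--
-- def split_genres_styles(
--     s: object | None,
--     delimiters: Sequence[str] = DELIMS_DEFAULT,
--     dedupe: bool = True,
--     lower: bool = True,
-- ) -> List[str]:
--     raw = safe_str(s)
--     if not raw:
--         return []
--     parts = [raw]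
--     for d in delimiters:
--         next_parts: list[str] = []
--         for p in parts:
--             next_parts.extend(p.split(d))
--         parts = next_parts
--     out: list[str] = []
--     seen: set[str] = set()
--     for tok in parts:
--         t = tok.strip()
--         if not t:
--             continue
--         t = t.lower() if lower else t
--         t = " ".join(t.split())  # collapse whitespace
--         if dedupe:
--             if t not in seen:
--                 seen.add(t)
--                 out.append(t)
--         else:
--             out.append(t)
--     return out
-- ===== SOURCE B (Python) =====
-- def split_genres_styles(s, delimiters=("|", ",", ";"), dedupe=True, lower=True):
--     raw = "" if s is None else str(s).strip()
--     if not raw: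
--         return []
--
--     ds = list(delimiters)
--     # depth-first: drive each piece through the remaining delimiters via an explicit stack
--     leaves = []
--     stack = [(raw, 0)]
--     while stack:
--         text, i = stack.pop()
--         if i == len(ds):
--             leaves.append(text)
--             continue
--         parts = text.split(ds[i])
--         j = i + 1
--         if len(parts) == 1:
--             stack.append((parts[0], j))
--         else:
--             stack.extend((chunk, j) for chunk in reversed(parts))
--
--     toks = []
--     for tok in leaves:
--         t = tok.strip()
--         if t:
--             t = t.lower() if lower else t
--             toks.append(" ".join(t.split()))
--     return list(dict.fromkeys(toks)) if dedupe else toks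
-- ===== Notes on version B (the rewrite author's own statement) =====
-- stated objective: alternative
-- what changed: B explodes the string depth-first with an explicit stack of (piece, delimiter-index) pairs, driving each piece through all remaining delimiters, instead of A's breadth-first per-delimiter re-splitting of a parts worklist; deduplication becomes a single dict.fromkeys pass over the normalized token list instead of A's interleaved seen-set bookkeeping.
import Mathlib
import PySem

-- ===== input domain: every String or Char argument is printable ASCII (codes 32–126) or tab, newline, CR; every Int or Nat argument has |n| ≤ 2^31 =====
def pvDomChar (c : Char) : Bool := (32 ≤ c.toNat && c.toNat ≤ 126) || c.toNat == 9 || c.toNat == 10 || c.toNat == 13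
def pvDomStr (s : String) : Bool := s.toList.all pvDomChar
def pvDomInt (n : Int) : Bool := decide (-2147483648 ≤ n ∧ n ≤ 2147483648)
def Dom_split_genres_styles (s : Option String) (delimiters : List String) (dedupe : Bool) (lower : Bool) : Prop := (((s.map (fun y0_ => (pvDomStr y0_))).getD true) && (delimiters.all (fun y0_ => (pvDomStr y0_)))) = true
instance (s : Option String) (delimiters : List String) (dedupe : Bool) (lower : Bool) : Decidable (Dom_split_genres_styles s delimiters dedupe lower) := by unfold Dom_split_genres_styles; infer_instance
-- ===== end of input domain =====

-- B restructures A: an explicit-stack depth-first loop drives each piece through the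
-- remaining delimiters (replacing A's per-delimiter worklist of re-split parts), and dedupe
-- becomes one dict.fromkeys pass after normalization instead of an interleaved seen-set
-- (objective: alternative).

-- ===== PORT A =====
-- p.split(d): exact for d ≠ ""; Python raises ValueError on d = "" (split? = none there,
-- excluded by Pre_; the .getD default is never reached inside Pre_).
def pvSplit (p : String) (d : String) : List String := (PySem.Str.split? p d).getD [p]
def split_genres_styles (s : Option String) (delimiters : List String) (dedupe : Bool) (lower : Bool) : List String :=
  let raw := match s with
    | none => ""
    | some x => PySem.Str.strip x
  if raw = "" then []
  else
    let parts := delimiters.foldl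
      (fun parts d => parts.foldl (fun next_parts p => next_parts ++ pvSplit p d) []) [raw]
    (parts.foldl (fun (st : List String × PySem.Set String) tok =>
      let t := PySem.Str.strip tok
      if t = "" then st
      else
        let t := if lower then PySem.Str.lower t else t
        let t := PySem.Str.join " " (PySem.Str.split₀ t)
        if dedupe then
          if PySem.Set.contains st.2 t then st
          else (st.1 ++ [t], PySem.Set.add st.2 t)
        else (st.1 ++ [t], st.2)) ([], PySem.Set.empty)).1

-- ===== PORT B =====
-- number of stack pops B's while-loop performs (fuel for the loop; decreases by 1 each pop)
def pvCount (text : String) : List String → Nat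
  | [] => 1
  | d :: rest => 1 + ((pvSplit text d).map (fun c => pvCount c rest)).sum

-- B's while-loop over the explicit stack; the Lean list's HEAD models the END of Python's
-- stack list (push = prepend, pop = head), so `stack.extend(reversed(parts))` is `parts ++ rest`.
-- ds[i] is ported as getD (i < ds.length on every reachable state).
def pvRun (ds : List String) : Nat → List (String × Nat) → List String → List String
  | 0, _, leaves => leaves
  | _ + 1, [], leaves => leaves
  | fuel + 1, (text, i) :: rest, leaves =>
    if i = ds.length then pvRun ds fuel rest (leaves ++ [text])
    else
      let parts := pvSplit text (ds.getD i "")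
      if parts.length = 1 then pvRun ds fuel ((parts.getD 0 "", i + 1) :: rest) leaves
      else pvRun ds fuel (parts.map (fun chunk => (chunk, i + 1)) ++ rest) leaves

def split_genres_styles_alt (s : Option String) (delimiters : List String) (dedupe : Bool) (lower : Bool) : List String :=
  let raw := match s with
    | none => ""
    | some x => PySem.Str.strip x
  if raw = "" then []
  else
    let leaves := pvRun delimiters (pvCount raw delimiters) [(raw, 0)] []
    let toks := leaves.foldl (fun toks tok =>
      let t := PySem.Str.strip tok
      if t = "" then toks
      else
        let t := if lower then PySem.Str.lower t else t
        toks ++ [PySem.Str.join " " (PySem.Str.split₀ t)]) []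
    if dedupe then PySem.List.dedup toks else toks

-- ===== PRECONDITION & SPEC =====
-- Python raises ValueError on str.split("") — excluded unless the stripped input is empty
-- (then A returns [] before splitting).
def Pre_split_genres_styles (s : Option String) (delimiters : List String) (dedupe : Bool) (lower : Bool) : Prop :=
  "" ∉ delimiters ∨ PySem.Str.strip (s.getD "") = ""
instance (s : Option String) (delimiters : List String) (dedupe : Bool) (lower : Bool) : Decidable (Pre_split_genres_styles s delimiters dedupe lower) := by unfold Pre_split_genres_styles; infer_instance
def pvWitness_split_genres_styles : Option String × List String × Bool × Bool :=
  (some "Rock | Pop,rock ;Jazz", ["|", ",", ";"], true, true)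
def Spec_split_genres_styles (s : Option String) (delimiters : List String) (dedupe : Bool) (lower : Bool) (out : List String) : Prop := out = split_genres_styles_alt s delimiters dedupe lower
instance (s : Option String) (delimiters : List String) (dedupe : Bool) (lower : Bool) (out : List String) : Decidable (Spec_split_genres_styles s delimiters dedupe lower out) := by unfold Spec_split_genres_styles; infer_instance

-- ===== CLAIM (what is proved, stated in full; the proofs are below) =====
def Claim_equal_split_genres_styles : Prop := ∀ (s : Option String) (delimiters : List String) (dedupe : Bool) (lower : Bool), Dom_split_genres_styles s delimiters dedupe lower → Pre_split_genres_styles s delimiters dedupe lower → Spec_split_genres_styles s delimiters dedupe lower (split_genres_styles s delimiters dedupe lower)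

-- ===== LEMMAS AND PROOFS =====

-- the recursive exploder: what both the iterative re-splitting (A) and the stack loop (B) compute
def pvExplode (text : String) (ds : List String) : List String :=
  match ds with
  | [] => [text]
  | d :: rest => (pvSplit text d).flatMap (fun chunk => pvExplode chunk rest)

theorem pvExplode_cons (t d : String) (rest : List String) :
    pvExplode t (d :: rest) = (pvSplit t d).flatMap (fun c => pvExplode c rest) := rfl

theorem pvCount_pos (text : String) (ds : List String) : 1 ≤ pvCount text ds := by
  cases ds <;> simp [pvCount]

-- total remaining pop count of a stack
def pvW (ds : List String) (stack : List (String × Nat)) : Nat :=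
  (stack.map (fun p => pvCount p.1 (ds.drop p.2))).sum

set_option maxRecDepth 4000 in
theorem pvRun_spec (ds : List String) (fuel : Nat) :
    ∀ (stack : List (String × Nat)) (leaves : List String),
    (∀ p ∈ stack, p.2 ≤ ds.length) → pvW ds stack ≤ fuel →
    pvRun ds fuel stack leaves
      = leaves ++ stack.flatMap (fun p => pvExplode p.1 (ds.drop p.2)) := by
  induction fuel with
  | zero =>
    intro stack leaves _ hW
    cases stack with
    | nil => simp [pvRun]
    | cons hd tl =>
      exfalso
      have := pvCount_pos hd.1 (ds.drop hd.2)
      simp [pvW] at hW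
      omega
  | succ fuel ih =>
    intro stack leaves hinv hW
    cases stack with
    | nil => simp [pvRun]
    | cons hd tl =>
      obtain ⟨text, i⟩ := hd
      have hiL : i ≤ ds.length := hinv (text, i) (by simp)
      by_cases hL : i = ds.length
      · have hdrop : ds.drop i = [] := by rw [hL]; exact List.drop_length
        rw [pvRun, if_pos hL, ih tl (leaves ++ [text])
          (fun p hp => hinv p (List.mem_cons_of_mem _ hp))
          (by simp only [pvW, List.map_cons, List.sum_cons, hdrop, pvCount] at hW
              simp only [pvW]
              omega)]
        simp [hdrop, pvExplode]
      · have hilt : i < ds.length := lt_of_le_of_ne hiL hL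
        have hdrop : ds.drop i = ds[i] :: ds.drop (i + 1) := List.drop_eq_getElem_cons hilt
        have hgetD : ds.getD i "" = ds[i] := List.getD_eq_getElem ds "" hilt
        have hWc : pvW ds ((text, i) :: tl)
            = 1 + ((pvSplit text ds[i]).map (fun c => pvCount c (ds.drop (i + 1)))).sum
              + pvW ds tl := by
          simp only [pvW, List.map_cons, List.sum_cons, hdrop, pvCount]
        rw [pvRun, if_neg hL]
        simp only [hgetD]
        by_cases hps : (pvSplit text ds[i]).length = 1
        · obtain ⟨p, hp⟩ := List.length_eq_one_iff.mp hps
          rw [if_pos hps,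
            ih (((pvSplit text ds[i]).getD 0 "", i + 1) :: tl) leaves
            (by intro q hq
                rcases List.mem_cons.mp hq with h | h
                · subst h; simpa using hilt
                · exact hinv q (List.mem_cons_of_mem _ h))
            (by rw [hWc] at hW
                simp only [hp, List.map_cons, List.map_nil, List.sum_cons, List.sum_nil] at hW
                simp only [pvW, List.map_cons, List.sum_cons, hp, List.getD_cons_zero] at hW ⊢
                omega)]
          simp only [hp, List.getD_cons_zero, List.flatMap_cons]
          rw [hdrop, pvExplode_cons, hp]
          simp
        · rw [if_neg hps,
            ih ((pvSplit text ds[i]).map (fun chunk => (chunk, i + 1)) ++ tl) leaves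
            (by intro q hq
                rcases List.mem_append.mp hq with h | h
                · obtain ⟨c, _, rfl⟩ := List.mem_map.mp h
                  simpa using hilt
                · exact hinv q (List.mem_cons_of_mem _ h))
            (by rw [hWc] at hW
                simp only [pvW, List.map_append, List.map_map, List.sum_append] at hW ⊢
                have hcomp : ((fun p : String × Nat => pvCount p.1 (ds.drop p.2)) ∘
                    fun chunk : String => (chunk, i + 1)) = fun c => pvCount c (ds.drop (i + 1)) := rfl
                rw [hcomp]
                omega)]
          rw [List.flatMap_append, List.flatMap_map]
          simp only [List.flatMap_cons]
          rw [hdrop, pvExplode_cons]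

-- per-token normalization: none = token dropped (strips to "")
def pvNorm (lower : Bool) (tok : String) : Option String :=
  let t := PySem.Str.strip tok
  if t = "" then none
  else some (PySem.Str.join " " (PySem.Str.split₀ (if lower then PySem.Str.lower t else t)))

-- A's iterative re-splitting equals the recursive exploder
theorem pv_split_eq (ds : List String) (xs : List String) :
    List.foldl (fun parts d => parts.foldl (fun a p => a ++ pvSplit p d) []) xs ds
      = xs.flatMap (fun x => pvExplode x ds) := by
  induction ds generalizing xs with
  | nil => simp [pvExplode]
  | cons d rest ih =>
    simp only [List.foldl_cons]
    rw [PySem.List.foldl_append_eq_flatMap, List.nil_append, ih, List.flatMap_assoc]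
    rfl

-- B's token loop is filterMap pvNorm
theorem pv_toks_eq (lower : Bool) (xs : List String) (acc : List String) :
    xs.foldl (fun toks tok =>
      let t := PySem.Str.strip tok
      if t = "" then toks
      else
        let t := if lower then PySem.Str.lower t else t
        toks ++ [PySem.Str.join " " (PySem.Str.split₀ t)]) acc
      = acc ++ xs.filterMap (pvNorm lower) := by
  induction xs generalizing acc with
  | nil => simp
  | cons x xs ih =>
    simp only [List.foldl_cons]
    rw [ih]
    by_cases h : PySem.Str.strip x = "" <;> simp [pvNorm, h]

-- first-occurrence dedup relative to an already-seen set
def pvDedup (seen : PySem.Set String) : List String → List String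
  | [] => []
  | t :: ts => if PySem.Set.contains seen t then pvDedup seen ts
               else t :: pvDedup (PySem.Set.add seen t) ts

theorem pv_foldl_add_eq (ts : List String) (seen : PySem.Set String) :
    ts.foldl PySem.Set.add seen = seen ++ pvDedup seen ts := by
  induction ts generalizing seen with
  | nil => simp [pvDedup]
  | cons t ts ih =>
    simp only [List.foldl_cons, pvDedup]
    by_cases h : PySem.Set.contains seen t
    · rw [show PySem.Set.add seen t = seen from by unfold PySem.Set.add; rw [if_pos h], ih, if_pos h]
    · rw [ih, if_neg h,
        show PySem.Set.add seen t = seen ++ [t] from by unfold PySem.Set.add; rw [if_neg h]]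
      simp

theorem pv_dedup_eq (ts : List String) : PySem.List.dedup ts = pvDedup PySem.Set.empty ts := by
  have := pv_foldl_add_eq ts PySem.Set.empty
  rw [PySem.List.dedup_eq_ofList, PySem.Set.ofList_eq_foldl]
  exact this

-- A's combined normalize/dedupe loop over the parts (pvStepA is definitionally A's loop body)
def pvStepA (dedupe lower : Bool) (st : List String × PySem.Set String) (tok : String) :
    List String × PySem.Set String :=
  let t := PySem.Str.strip tok
  if t = "" then st
  else
    let t := if lower then PySem.Str.lower t else t
    let t := PySem.Str.join " " (PySem.Str.split₀ t)
    if dedupe then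
      if PySem.Set.contains st.2 t then st
      else (st.1 ++ [t], PySem.Set.add st.2 t)
    else (st.1 ++ [t], st.2)

theorem pv_loop_eq (dedupe lower : Bool) (parts : List String)
    (out : List String) (seen : PySem.Set String) :
    (parts.foldl (pvStepA dedupe lower) (out, seen)).1
      = out ++ (if dedupe then pvDedup seen (parts.filterMap (pvNorm lower))
                else parts.filterMap (pvNorm lower)) := by
  induction parts generalizing out seen with
  | nil => simp [pvDedup]
  | cons p parts ih =>
    simp only [List.foldl_cons, List.filterMap_cons]
    by_cases h : PySem.Str.strip p = ""
    · have hn : pvNorm lower p = none := by simp [pvNorm, h]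
      have hs : pvStepA dedupe lower (out, seen) p = (out, seen) := by simp [pvStepA, h]
      rw [hn, hs, ih]
    · have hn : pvNorm lower p =
          some (PySem.Str.join " " (PySem.Str.split₀
            (if lower then PySem.Str.lower (PySem.Str.strip p) else PySem.Str.strip p))) := by
        simp [pvNorm, h]
      rw [hn]
      cases dedupe with
      | false =>
        have hs : pvStepA false lower (out, seen) p =
            (out ++ [PySem.Str.join " " (PySem.Str.split₀
              (if lower then PySem.Str.lower (PySem.Str.strip p) else PySem.Str.strip p))], seen) := by
          simp [pvStepA, h]
        rw [hs, ih]
        simp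
      | true =>
        by_cases hc : PySem.Set.contains seen (PySem.Str.join " " (PySem.Str.split₀
            (if lower then PySem.Str.lower (PySem.Str.strip p) else PySem.Str.strip p)))
        · have hc' : (PySem.Str.join " " (PySem.Str.split₀
              (if lower then PySem.Str.lower (PySem.Str.strip p) else PySem.Str.strip p))) ∈ seen :=
            List.mem_of_elem_eq_true hc
          have hs : pvStepA true lower (out, seen) p = (out, seen) := by
            simp [pvStepA, h, hc']
          rw [hs, ih]
          simp [pvDedup, hc']
        · have hc' : ¬ (PySem.Str.join " " (PySem.Str.split₀
              (if lower then PySem.Str.lower (PySem.Str.strip p) else PySem.Str.strip p))) ∈ seen :=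
            fun m => hc (List.elem_eq_true_of_mem m)
          have hs : pvStepA true lower (out, seen) p =
              (out ++ [PySem.Str.join " " (PySem.Str.split₀
                (if lower then PySem.Str.lower (PySem.Str.strip p) else PySem.Str.strip p))],
               PySem.Set.add seen (PySem.Str.join " " (PySem.Str.split₀
                (if lower then PySem.Str.lower (PySem.Str.strip p) else PySem.Str.strip p)))) := by
            simp [pvStepA, h, hc']
          rw [hs, ih]
          simp [pvDedup, hc']

-- the common body, with the raw string abstracted
theorem pv_core (delimiters : List String) (dedupe lower : Bool) (raw : String) :
    (if raw = "" then [] else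
      (List.foldl (pvStepA dedupe lower)
        ([], PySem.Set.empty)
        (delimiters.foldl
          (fun parts d => parts.foldl (fun next_parts p => next_parts ++ pvSplit p d) []) [raw])).1)
    = (if raw = "" then [] else
        (if dedupe then
          PySem.List.dedup ((pvRun delimiters (pvCount raw delimiters) [(raw, 0)] []).foldl (fun toks tok =>
            let t := PySem.Str.strip tok
            if t = "" then toks
            else
              let t := if lower then PySem.Str.lower t else t
              toks ++ [PySem.Str.join " " (PySem.Str.split₀ t)]) [])
        else (pvRun delimiters (pvCount raw delimiters) [(raw, 0)] []).foldl (fun toks tok =>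
            let t := PySem.Str.strip tok
            if t = "" then toks
            else
              let t := if lower then PySem.Str.lower t else t
              toks ++ [PySem.Str.join " " (PySem.Str.split₀ t)]) [])) := by
  by_cases h : raw = ""
  · rw [if_pos h, if_pos h]
  · rw [if_neg h, if_neg h]
    rw [show (delimiters.foldl
        (fun parts d => parts.foldl (fun next_parts p => next_parts ++ pvSplit p d) []) [raw])
        = pvExplode raw delimiters from by rw [pv_split_eq]; simp]
    rw [show pvRun delimiters (pvCount raw delimiters) [(raw, 0)] [] = pvExplode raw delimiters from by
      rw [pvRun_spec delimiters (pvCount raw delimiters) [(raw, 0)] []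
        (by simp) (by simp [pvW])]
      simp]
    refine (pv_loop_eq dedupe lower _ [] PySem.Set.empty).trans ?_
    rw [pv_toks_eq lower _ []]
    cases dedupe with
    | false => simp
    | true => rw [pv_dedup_eq]; simp [PySem.Set.empty]

-- ===== VERDICT (by name: the statement is the Claim_ definition above) =====
theorem split_genres_styles_spec : Claim_equal_split_genres_styles := by
  intro s delimiters dedupe lower _ _
  unfold Spec_split_genres_styles
  cases s with
  | none => exact pv_core delimiters dedupe lower ""
  | some x => exact pv_core delimiters dedupe lower (PySem.Str.strip x)
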